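-- pv_equiv track=rewrite | github.com/avalov05/Project-VSim | src/structure/predictor.py | _find_hydrophobic_regions
-- ===== SOURCE A (Python) =====
-- from typing import Dict, List, Optional
--
-- def _find_hydrophobic_regions(sequence: str, min_length: int = 20) -> List[tuple]:
--     """Find hydrophobic regions (potential transmembrane domains)"""
--     hydrophobic = set('AILMFWV')
--     regions = []
--
--     start = None
--     for i, aa in enumerate(sequence):
--         if aa in hydrophobic:
--             if start is None:
--                 start = i
--         else:
--             if start is not None and i - start >= min_length:
--                 regions.append((start, i))
--             start = None
--
--     if start is not None and len(sequence) - start >= min_length: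
--         regions.append((start, len(sequence)))
--
--     return regions
-- ===== SOURCE B (Python) =====
-- import re
-- from typing import List
--
-- def _find_hydrophobic_regions(sequence: str, min_length: int = 20) -> List[tuple]:
--     """Find hydrophobic regions (potential transmembrane domains)"""
--     return [(m.start(), m.end())
--             for m in re.finditer(r'[AILMFWV]+', sequence)
--             if m.end() - m.start() >= min_length]
-- ===== Notes on version B (the rewrite author's own statement) =====
-- stated objective: idiomatic
-- what changed: Replaces the manual start/None state machine with its post-loop flush by re.finditer over [AILMFWV]+, which yields the maximal hydrophobic runs directly; a comprehension keeps the runs of sufficient length.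
import Mathlib
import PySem

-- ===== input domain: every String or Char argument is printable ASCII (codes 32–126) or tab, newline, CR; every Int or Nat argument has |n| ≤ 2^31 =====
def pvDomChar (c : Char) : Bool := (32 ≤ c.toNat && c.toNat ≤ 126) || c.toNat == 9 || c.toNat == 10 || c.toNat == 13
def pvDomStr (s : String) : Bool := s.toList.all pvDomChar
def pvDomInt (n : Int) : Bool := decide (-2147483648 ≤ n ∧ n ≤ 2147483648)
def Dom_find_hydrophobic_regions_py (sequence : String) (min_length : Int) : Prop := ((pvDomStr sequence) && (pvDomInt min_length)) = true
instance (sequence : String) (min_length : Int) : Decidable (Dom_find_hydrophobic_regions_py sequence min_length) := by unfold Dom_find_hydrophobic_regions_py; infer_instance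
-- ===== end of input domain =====

-- B replaces A's manual start/None state machine (with its post-loop flush) by iterating
-- over the maximal hydrophobic runs directly (re.finditer in Python); objective: idiomatic.

-- ===== PORT A =====
-- hydrophobic = set('AILMFWV')
def pvHydroA : PySem.Set Char := PySem.Set.ofList "AILMFWV".toList

-- the for-loop over enumerate(sequence): state = (regions, start)
def pvLoopA (min_length : Int) : List Char → Nat → List (Int × Int) → Option Int → List (Int × Int) × Option Int
  | [], _, regions, start => (regions, start)
  | aa :: rest, i, regions, start =>
    if PySem.Set.contains pvHydroA aa then
      pvLoopA min_length rest (i + 1) regions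
        (match start with | none => some (i : Int) | some s => some s)
    else
      match start with
      | some s =>
          pvLoopA min_length rest (i + 1)
            (if (i : Int) - s ≥ min_length then regions ++ [(s, (i : Int))] else regions) none
      | none => pvLoopA min_length rest (i + 1) regions none

def find_hydrophobic_regions_py (sequence : String) (min_length : Int) : List (Int × Int) :=
  let cs := sequence.toList
  match pvLoopA min_length cs 0 [] none with
  | (regions, some s) =>
      if ((cs.length : Int) - s ≥ min_length) then regions ++ [(s, (cs.length : Int))] else regions
  | (regions, none) => regions

-- ===== PORT B =====
-- the regex character class [AILMFWV]
def pvHydroB (c : Char) : Bool := decide (c ∈ (['A', 'I', 'L', 'M', 'F', 'W', 'V'] : List Char))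

-- hand port (exact) of re.finditer(r'[AILMFWV]+', ·): the (start, end) spans of the
-- maximal runs of class characters, left to right (PySem has no regex primitive)
def pvRuns : List Char → Nat → List (Nat × Nat)
  | [], _ => []
  | c :: rest, i =>
    if pvHydroB c then
      let j := i + 1 + (rest.takeWhile pvHydroB).length
      (i, j) :: pvRuns (rest.dropWhile pvHydroB) j
    else
      pvRuns rest (i + 1)
  termination_by cs _ => cs.length
  decreasing_by
  · exact Nat.lt_succ_of_le (List.length_dropWhile_le pvHydroB rest)
  · exact Nat.lt_succ_of_le (Nat.le_refl _)

def find_hydrophobic_regions_py_alt (sequence : String) (min_length : Int) : List (Int × Int) :=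
  ((pvRuns sequence.toList 0).filter
      (fun p => decide ((p.2 : Int) - (p.1 : Int) ≥ min_length))).map
    (fun p => ((p.1 : Int), (p.2 : Int)))

-- ===== PRECONDITION & SPEC =====
def Spec_find_hydrophobic_regions_py (sequence : String) (min_length : Int) (out : List (Int × Int)) : Prop := out = find_hydrophobic_regions_py_alt sequence min_length
instance (sequence : String) (min_length : Int) (out : List (Int × Int)) : Decidable (Spec_find_hydrophobic_regions_py sequence min_length out) := by unfold Spec_find_hydrophobic_regions_py; infer_instance

-- ===== CLAIM (what is proved, stated in full; the proofs are below) =====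
def Claim_equal_find_hydrophobic_regions_py : Prop := ∀ (sequence : String) (min_length : Int), Dom_find_hydrophobic_regions_py sequence min_length → Spec_find_hydrophobic_regions_py sequence min_length (find_hydrophobic_regions_py sequence min_length)

-- ===== LEMMAS AND PROOFS =====

-- A's final flush, as a function of the loop state and len(sequence)
def pvFlush (m : Int) (p : List (Int × Int) × Option Int) (t : Nat) : List (Int × Int) :=
  match p.2 with
  | some s => if (t : Int) - s ≥ m then p.1 ++ [(s, (t : Int))] else p.1
  | none => p.1

def pvEmit (m : Int) (a : Int) (b : Nat) : List (Int × Int) :=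
  if (b : Int) - a ≥ m then [(a, (b : Int))] else []

def pvFilt (m : Int) (l : List (Nat × Nat)) : List (Int × Int) :=
  (l.filter (fun p => decide ((p.2 : Int) - (p.1 : Int) ≥ m))).map
    (fun p => ((p.1 : Int), (p.2 : Int)))

theorem pvHydro_eq (c : Char) : PySem.Set.contains pvHydroA c = pvHydroB c := by
  have h : pvHydroA = ['A', 'I', 'L', 'M', 'F', 'W', 'V'] := by decide
  rw [h, PySem.Set.contains_eq_listContains]
  simp [pvHydroB]

theorem pvFilt_cons (m : Int) (a b : Nat) (l : List (Nat × Nat)) :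
    pvFilt m ((a, b) :: l) = pvEmit m (a : Int) b ++ pvFilt m l := by
  simp only [pvFilt, pvEmit, List.filter_cons]
  split <;> rename_i h <;> simp_all

theorem pvAppend_emit (m : Int) (regions : List (Int × Int)) (s : Int) (i : Nat) :
    (if (i : Int) - s ≥ m then regions ++ [(s, (i : Int))] else regions)
      = regions ++ pvEmit m s i := by
  simp only [pvEmit]; split <;> simp

theorem pvMain (m : Int) : ∀ (n : Nat) (cs : List Char), cs.length ≤ n →
    ∀ (i : Nat) (regions : List (Int × Int)),
    (pvFlush m (pvLoopA m cs i regions none) (i + cs.length)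
        = regions ++ pvFilt m (pvRuns cs i)) ∧
    (∀ s : Int, pvFlush m (pvLoopA m cs i regions (some s)) (i + cs.length)
        = regions ++ pvEmit m s (i + (cs.takeWhile pvHydroB).length)
            ++ pvFilt m (pvRuns (cs.dropWhile pvHydroB) (i + (cs.takeWhile pvHydroB).length))) := by
  intro n
  induction n with
  | zero =>
      intro cs hcs i regions
      have h0 : cs = [] := List.eq_nil_of_length_eq_zero (Nat.le_zero.mp hcs)
      subst h0
      constructor
      · simp [pvLoopA, pvFlush, pvRuns, pvFilt]
      · intro s
        simp only [pvLoopA, pvFlush, List.takeWhile_nil, List.dropWhile_nil, pvRuns,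
          List.length_nil, Nat.add_zero, pvFilt, List.filter_nil, List.map_nil, List.append_nil]
        exact pvAppend_emit m regions s i
  | succ n ih =>
      intro cs hcs i regions
      cases cs with
      | nil =>
          constructor
          · simp [pvLoopA, pvFlush, pvRuns, pvFilt]
          · intro s
            simp only [pvLoopA, pvFlush, List.takeWhile_nil, List.dropWhile_nil, pvRuns,
              List.length_nil, Nat.add_zero, pvFilt, List.filter_nil, List.map_nil, List.append_nil]
            exact pvAppend_emit m regions s i
      | cons c rest =>
          have hrest : rest.length ≤ n := by
            simpa [List.length_cons] using Nat.succ_le_succ_iff.mp hcs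
          have hlen : i + (c :: rest).length = (i + 1) + rest.length := by
            simp [List.length_cons]; omega
          by_cases h : pvHydroB c
          · -- hydrophobic character
            have hA : PySem.Set.contains pvHydroA c = true := by rw [pvHydro_eq]; exact h
            constructor
            · -- start = none : run begins at i
              rw [hlen]
              have hstep : pvLoopA m (c :: rest) i regions none
                  = pvLoopA m rest (i + 1) regions (some (i : Int)) := by
                simp only [pvLoopA, hA, if_true]
              rw [hstep, (ih rest hrest (i + 1) regions).2 (i : Int)]
              have hr : pvRuns (c :: rest) i
                    = (i, i + 1 + (rest.takeWhile pvHydroB).length)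
                      :: pvRuns (rest.dropWhile pvHydroB) (i + 1 + (rest.takeWhile pvHydroB).length) := by
                rw [pvRuns]; simp [h]
              rw [hr, pvFilt_cons]
              simp [List.append_assoc, Nat.add_assoc]
            · -- start = some s : run continues
              intro s
              rw [hlen]
              have hstep : pvLoopA m (c :: rest) i regions (some s)
                  = pvLoopA m rest (i + 1) regions (some s) := by
                simp only [pvLoopA, hA, if_true]
              rw [hstep, (ih rest hrest (i + 1) regions).2 s]
              have ht : (c :: rest).takeWhile pvHydroB = c :: rest.takeWhile pvHydroB := by
                simp [h]
              have hd : (c :: rest).dropWhile pvHydroB = rest.dropWhile pvHydroB := by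
                simp [h]
              rw [ht, hd]
              have : i + (c :: rest.takeWhile pvHydroB).length
                    = (i + 1) + (rest.takeWhile pvHydroB).length := by
                simp [List.length_cons]; omega
              rw [this]
          · -- non-hydrophobic character
            have hA : PySem.Set.contains pvHydroA c = false := by
              rw [pvHydro_eq]; exact Bool.eq_false_iff.mpr (by simpa using h)
            constructor
            · rw [hlen]
              have hstep : pvLoopA m (c :: rest) i regions none
                  = pvLoopA m rest (i + 1) regions none := by
                simp only [pvLoopA, hA]; simp
              rw [hstep, (ih rest hrest (i + 1) regions).1]
              have hr : pvRuns (c :: rest) i = pvRuns rest (i + 1) := by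
                rw [pvRuns]; simp [h]
              rw [hr]
            · intro s
              rw [hlen]
              have hstep : pvLoopA m (c :: rest) i regions (some s)
                  = pvLoopA m rest (i + 1)
                      (if (i : Int) - s ≥ m then regions ++ [(s, (i : Int))] else regions) none := by
                simp only [pvLoopA, hA]; simp
              rw [hstep, pvAppend_emit, (ih rest hrest (i + 1) (regions ++ pvEmit m s i)).1]
              have ht : (c :: rest).takeWhile pvHydroB = [] := by
                simp [h]
              have hd : (c :: rest).dropWhile pvHydroB = c :: rest := by
                simp [h]
              have hr : pvRuns (c :: rest) i = pvRuns rest (i + 1) := by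
                rw [pvRuns]; simp [h]
              rw [ht, hd]
              simp only [List.length_nil, Nat.add_zero]
              rw [hr]

-- ===== VERDICT (by name: the statement is the Claim_ definition above) =====
theorem find_hydrophobic_regions_py_spec : Claim_equal_find_hydrophobic_regions_py := by
  intro sequence min_length _
  show find_hydrophobic_regions_py sequence min_length
      = find_hydrophobic_regions_py_alt sequence min_length
  have h1 : find_hydrophobic_regions_py sequence min_length
      = pvFlush min_length (pvLoopA min_length sequence.toList 0 [] none) sequence.toList.length := by
    unfold find_hydrophobic_regions_py
    rcases hp : pvLoopA min_length sequence.toList 0 [] none with ⟨regions, start⟩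
    cases start <;> simp [pvFlush, hp]
  have h2 := (pvMain min_length sequence.toList.length sequence.toList (Nat.le_refl _) 0 []).1
  rw [h1]
  rw [show sequence.toList.length = 0 + sequence.toList.length from (Nat.zero_add _).symm, h2]
  simp [find_hydrophobic_regions_py_alt, pvFilt]
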